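-- pv_equiv track=rewrite | github.com/XAIHT/Tlamatini | Tlamatini/agent/tools.py | _split_assignment_segment
-- ===== SOURCE A (Python) =====
-- def _split_assignment_segment(segment):
--     current = []
--     quote_char = None
--     escape_next = False
--     bracket_stack = []
--
--     for idx, char in enumerate(segment):
--         if quote_char:
--             current.append(char)
--             if escape_next:
--                 escape_next = False
--             elif char == '\\':
--                 escape_next = True
--             elif char == quote_char:
--                 quote_char = None
--             continue
--
--         if char in ('"', "'"):
--             quote_char = char
--             current.append(char)
--             continue
--
--         if char in '[{(':
--             bracket_stack.append(char)
--             current.append(char)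
--             continue
--
--         if char in ']})':
--             if bracket_stack:
--                 bracket_stack.pop()
--             current.append(char)
--             continue
--
--         if char == '=' and not bracket_stack:
--             key = ''.join(current).strip()
--             value = segment[idx + 1:].strip()
--             return key, value
--
--         current.append(char)
--
--     return None, None
-- ===== SOURCE B (Python) =====
-- def _skip_quoted(segment, i, quote):
--     n = len(segment)
--     while i < n:
--         c = segment[i]
--         if c == '\\':
--             i += 2
--         elif c == quote:
--             return i + 1
--         else:
--             i += 1
--     return i
--
--
-- def _split_assignment_segment(segment):
--     n = len(segment)
--     i = 0
--     depth = 0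
--     while i < n:
--         c = segment[i]
--         if c in '"\'':
--             i = _skip_quoted(segment, i + 1, c)
--         elif c in '[{(':
--             depth += 1
--             i += 1
--         elif c in ']})':
--             if depth:
--                 depth -= 1
--             i += 1
--         elif c == '=' and depth == 0:
--             return segment[:i].strip(), segment[i + 1:].strip()
--         else:
--             i += 1
--     return None, None
-- ===== Notes on version B (the rewrite author's own statement) =====
-- stated objective: alternative
-- what changed: B replaces A's flat four-variable state machine (key accumulator, quote flag, escape flag, bracket stack) with a two-level index scanner: a dedicated helper consumes an entire quoted section (jumping two chars on a backslash), the main loop keeps only an integer depth, and both key and value are produced by slicing the original string instead of rebuilding the key char-by-char.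
import Mathlib
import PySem

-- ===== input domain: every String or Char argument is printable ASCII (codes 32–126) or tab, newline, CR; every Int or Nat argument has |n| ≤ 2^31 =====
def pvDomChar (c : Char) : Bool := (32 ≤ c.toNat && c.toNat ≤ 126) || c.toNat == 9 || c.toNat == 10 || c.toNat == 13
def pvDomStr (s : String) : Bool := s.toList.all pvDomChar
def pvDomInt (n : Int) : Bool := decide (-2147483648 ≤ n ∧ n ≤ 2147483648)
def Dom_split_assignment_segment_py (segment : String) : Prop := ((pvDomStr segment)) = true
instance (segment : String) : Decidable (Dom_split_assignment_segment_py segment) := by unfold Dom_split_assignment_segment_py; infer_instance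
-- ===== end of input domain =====

-- B replaces A's flat 4-variable state machine (key accumulator, quote flag, escape flag, bracket stack)
-- by a two-level index scanner: a dedicated sub-scanner skips a whole quoted section, the main loop keeps
-- only an integer depth, and both parts come from slices of the input; objective: alternative decomposition.

-- ===== PORT A =====
-- literal port of A's loop: state = (current accumulator, quote_char, escape_next, bracket_stack); idx tracks enumerate
def splitSegAuxA (full : List Char) : List Char → Nat → List Char → Option Char → Bool → List Char →
    Option String × Option String
  | [], _, _, _, _, _ => (none, none)
  | c :: rest, idx, cur, quote, esc, stack =>
    match quote with
    | some q =>
      if esc then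
        splitSegAuxA full rest (idx + 1) (cur ++ [c]) (some q) false stack
      else if c = '\\' then
        splitSegAuxA full rest (idx + 1) (cur ++ [c]) (some q) true stack
      else if c = q then
        splitSegAuxA full rest (idx + 1) (cur ++ [c]) none esc stack
      else
        splitSegAuxA full rest (idx + 1) (cur ++ [c]) (some q) esc stack
    | none =>
      if c = '"' ∨ c = '\'' then
        splitSegAuxA full rest (idx + 1) (cur ++ [c]) (some c) esc stack
      else if c = '[' ∨ c = '{' ∨ c = '(' then
        splitSegAuxA full rest (idx + 1) (cur ++ [c]) none esc (stack ++ [c])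
      else if c = ']' ∨ c = '}' ∨ c = ')' then
        splitSegAuxA full rest (idx + 1) (cur ++ [c]) none esc (if stack = [] then stack else stack.dropLast)
      else if c = '=' ∧ stack = [] then
        (some (String.ofList (PySem.Chars.strip cur)),
         some (String.ofList (PySem.Chars.strip (PySem.List.slice full (some ((idx : Int) + 1)) none))))
      else
        splitSegAuxA full rest (idx + 1) (cur ++ [c]) none esc stack

def split_assignment_segment_py (segment : String) : Option String × Option String :=
  splitSegAuxA segment.toList segment.toList 0 [] none false []

-- ===== PORT B =====
-- port of Source B's _skip_quoted: consume the rest of a quoted section ('\\' jumps two chars),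
-- returning the unread suffix together with the new index
def skipQuoted (q : Char) : List Char → Nat → List Char × Nat
  | [], i => ([], i)
  | c :: rest, i =>
    if c = '\\' then
      match rest with
      | [] => ([], i + 2)
      | _ :: rest2 => skipQuoted q rest2 (i + 2)
    else if c = q then (rest, i + 1)
    else skipQuoted q rest (i + 1)

-- needed for the termination of splitMainB below
theorem skipQuoted_len_aux (n : Nat) : ∀ (l : List Char) (q : Char) (i : Nat),
    l.length ≤ n → (skipQuoted q l i).1.length ≤ l.length := by
  induction n with
  | zero =>
    intro l q i h
    have hl : l = [] := by cases l <;> simp_all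
    subst hl; simp [skipQuoted]
  | succ n ih =>
    intro l q i h
    cases l with
    | nil => simp [skipQuoted]
    | cons c rest =>
      by_cases h1 : c = '\\'
      · cases rest with
        | nil => rw [skipQuoted.eq_def]; simp [h1]
        | cons d rest2 =>
          have hs : skipQuoted q (c :: d :: rest2) i = skipQuoted q rest2 (i + 2) := by
            rw [skipQuoted.eq_def]; simp [h1]
          have := ih rest2 q (i + 2) (by simp at h; omega)
          rw [hs]; simp only [List.length_cons]; omega
      · by_cases h2 : c = q
        · subst h2
          have hs : skipQuoted c (c :: rest) i = (rest, i + 1) := by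
            rw [skipQuoted.eq_def]; simp [h1]
          rw [hs]; simp
        · have hs : skipQuoted q (c :: rest) i = skipQuoted q rest (i + 1) := by
            rw [skipQuoted.eq_def]; simp [h1, h2]
          have := ih rest q (i + 1) (by simp at h; omega)
          rw [hs]; simp only [List.length_cons]; omega

theorem skipQuoted_len (q : Char) (l : List Char) (i : Nat) :
    (skipQuoted q l i).1.length ≤ l.length :=
  skipQuoted_len_aux l.length l q i le_rfl

-- port of Source B's main while-loop: only an index and an integer depth are kept;
-- a quoted section is handed to skipQuoted; both parts come from slices of the input
def splitMainB (full : List Char) : List Char → Nat → Nat → Option String × Option String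
  | [], _, _ => (none, none)
  | c :: rest, i, depth =>
    if c = '"' ∨ c = '\'' then
      let p := skipQuoted c rest (i + 1)
      splitMainB full p.1 p.2 depth
    else if c = '[' ∨ c = '{' ∨ c = '(' then
      splitMainB full rest (i + 1) (depth + 1)
    else if c = ']' ∨ c = '}' ∨ c = ')' then
      splitMainB full rest (i + 1) (if depth = 0 then depth else depth - 1)
    else if c = '=' ∧ depth = 0 then
      (some (String.ofList (PySem.Chars.strip (PySem.List.slice full none (some (i : Int))))),
       some (String.ofList (PySem.Chars.strip (PySem.List.slice full (some ((i : Int) + 1)) none))))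
    else
      splitMainB full rest (i + 1) depth
termination_by l _ _ => l.length
decreasing_by
  · exact Nat.lt_succ_of_le (skipQuoted_len c rest (i + 1))
  · simp
  · simp
  · simp

def split_assignment_segment_py_alt (segment : String) : Option String × Option String :=
  splitMainB segment.toList segment.toList 0 0

-- ===== PRECONDITION & SPEC =====
def Spec_split_assignment_segment_py (segment : String) (out : Option String × Option String) : Prop := out = split_assignment_segment_py_alt segment
instance (segment : String) (out : Option String × Option String) : Decidable (Spec_split_assignment_segment_py segment out) := by unfold Spec_split_assignment_segment_py; infer_instance

-- ===== CLAIM (what is proved, stated in full; the proofs are below) =====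
def Claim_equal_split_assignment_segment_py : Prop := ∀ (segment : String), Dom_split_assignment_segment_py segment → Spec_split_assignment_segment_py segment (split_assignment_segment_py segment)

-- ===== LEMMAS AND PROOFS =====

-- A's in-quote scan reduces to skipQuoted: either the input runs out (both yield (none,none))
-- or A re-enters the unquoted state exactly at skipQuoted's answer
theorem skipA (full : List Char) : ∀ (n : Nat) (rest cur : List Char) (q : Char) (stack : List Char),
    rest.length ≤ n → full = cur ++ rest →
    ((skipQuoted q rest cur.length).1 = [] ∧
      splitSegAuxA full rest cur.length cur (some q) false stack = (none, none)) ∨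
    (∃ cur2 : List Char, full = cur2 ++ (skipQuoted q rest cur.length).1 ∧
      cur2.length = (skipQuoted q rest cur.length).2 ∧
      splitSegAuxA full rest cur.length cur (some q) false stack =
        splitSegAuxA full (skipQuoted q rest cur.length).1 (skipQuoted q rest cur.length).2 cur2 none false stack) := by
  intro n
  induction n with
  | zero =>
    intro rest cur q stack h hfull
    have : rest = [] := by cases rest <;> simp_all
    subst this
    left; simp [skipQuoted, splitSegAuxA]
  | succ n ih =>
    intro rest cur q stack h hfull
    cases rest with
    | nil => left; simp [skipQuoted, splitSegAuxA]
    | cons c rest =>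
      by_cases h1 : c = '\\'
      · cases rest with
        | nil =>
          left
          refine ⟨by rw [skipQuoted.eq_def]; simp [h1], by simp [splitSegAuxA, h1]⟩
        | cons d rest2 =>
          have step : splitSegAuxA full (c :: d :: rest2) cur.length cur (some q) false stack =
              splitSegAuxA full rest2 (cur.length + 2) (cur ++ [c] ++ [d]) (some q) false stack := by
            simp [splitSegAuxA, h1]
          have hskip : skipQuoted q (c :: d :: rest2) cur.length = skipQuoted q rest2 (cur.length + 2) := by
            rw [skipQuoted.eq_def]; simp [h1]
          have ihr := ih rest2 (cur ++ [c] ++ [d]) q stack (by simp at h ⊢; omega)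
            (by simp [hfull])
          rw [hskip, step]
          simpa using ihr
      · by_cases h2 : c = q
        · subst h2
          have hsq : skipQuoted c (c :: rest) cur.length = (rest, cur.length + 1) := by
            rw [skipQuoted.eq_def]; simp [h1]
          right
          refine ⟨cur ++ [c], ?_, ?_, ?_⟩
          · simp [hsq, hfull]
          · simp [hsq]
          · rw [hsq]; simp [splitSegAuxA, h1]
        · have step : splitSegAuxA full (c :: rest) cur.length cur (some q) false stack =
              splitSegAuxA full rest (cur.length + 1) (cur ++ [c]) (some q) false stack := by
            simp [splitSegAuxA, h1, h2]
          have hskip : skipQuoted q (c :: rest) cur.length = skipQuoted q rest (cur.length + 1) := by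
            rw [skipQuoted.eq_def]; simp [h1, h2]
          have ihr := ih rest (cur ++ [c]) q stack (by simp at h ⊢; omega) (by simp [hfull])
          rw [hskip, step]
          simpa using ihr

-- main equivalence: A's unquoted state equals B's main loop (depth = stack length, cur = consumed prefix)
theorem mainAB (full : List Char) : ∀ (n : Nat) (rest cur stack : List Char),
    rest.length ≤ n → full = cur ++ rest →
    splitSegAuxA full rest cur.length cur none false stack = splitMainB full rest cur.length stack.length := by
  intro n
  induction n with
  | zero =>
    intro rest cur stack h hfull
    have : rest = [] := by cases rest <;> simp_all
    subst this
    simp [splitSegAuxA, splitMainB]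
  | succ n ih =>
    intro rest cur stack h hfull
    cases rest with
    | nil => simp [splitSegAuxA, splitMainB]
    | cons c rest =>
      by_cases h1 : c = '"' ∨ c = '\''
      · have stepA : splitSegAuxA full (c :: rest) cur.length cur none false stack =
            splitSegAuxA full rest (cur.length + 1) (cur ++ [c]) (some c) false stack := by
          simp [splitSegAuxA, h1]
        have stepB : splitMainB full (c :: rest) cur.length stack.length =
            splitMainB full (skipQuoted c rest (cur.length + 1)).1 (skipQuoted c rest (cur.length + 1)).2 stack.length := by
          simp [splitMainB, h1]
        rw [stepA, stepB]
        have hsk := skipA full rest.length rest (cur ++ [c]) c stack le_rfl (by simp [hfull])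
        simp only [List.length_append, List.length_singleton] at hsk
        rcases hsk with ⟨hnil, hval⟩ | ⟨cur2, hfull2, hlen2, hval⟩
        · rw [hval, hnil]
          simp [splitMainB]
        · rw [hval]
          have hle : (skipQuoted c rest (cur.length + 1)).1.length ≤ n := by
            have := skipQuoted_len c rest (cur.length + 1)
            simp at h; omega
          have := ih (skipQuoted c rest (cur.length + 1)).1 cur2 stack hle hfull2
          rw [hlen2] at this
          exact this
      · have hstep : ∀ (st : List Char),
            splitSegAuxA full rest (cur.length + 1) (cur ++ [c]) none false st =
              splitMainB full rest (cur.length + 1) st.length := by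
          intro st
          have := ih rest (cur ++ [c]) st (by simp at h ⊢; omega) (by simp [hfull])
          simpa using this
        by_cases h2 : c = '[' ∨ c = '{' ∨ c = '('
        · simp only [splitSegAuxA, splitMainB, h1, h2, if_true, if_false]
          simpa using hstep (stack ++ [c])
        · by_cases h3 : c = ']' ∨ c = '}' ∨ c = ')'
          · simp only [splitSegAuxA, splitMainB, h1, h2, h3, if_true, if_false]
            have hlen : (if stack = [] then stack else stack.dropLast).length =
                (if stack.length = 0 then stack.length else stack.length - 1) := by
              rcases stack with _ | ⟨a, s⟩ <;> simp
            rw [hstep (if stack = [] then stack else stack.dropLast), hlen]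
          · by_cases h4 : c = '=' ∧ stack = []
            · obtain ⟨hc, hs⟩ := h4
              subst hc; subst hs
              have hcur : PySem.List.slice full none (some ((cur.length : Nat) : Int)) = cur := by
                rw [PySem.List.slice_to_natCast, hfull]
                simp
              simp [splitSegAuxA, splitMainB, hcur]
            · have h4' : ¬ (c = '=' ∧ stack.length = 0) := by
                intro hx; exact h4 ⟨hx.1, by rcases stack with _ | _ <;> simp_all⟩
              simp only [splitSegAuxA, splitMainB, h1, h2, h3, h4, h4', if_false]
              exact hstep stack

-- ===== VERDICT (by name: the statement is the Claim_ definition above) =====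
theorem split_assignment_segment_py_spec : Claim_equal_split_assignment_segment_py := by
  intro segment _
  unfold Spec_split_assignment_segment_py split_assignment_segment_py split_assignment_segment_py_alt
  have := mainAB segment.toList segment.toList.length segment.toList [] [] le_rfl (by simp)
  simpa using this
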